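-- pv_equiv track=rewrite | github.com/LischenH/Pliniusbiefe | src/ui/construction_hunt.py | _highlight_html
-- ===== SOURCE A (Python) =====
-- def _highlight_html(latin: str, start_idx: int, end_idx: int, color: str, bg: str) -> str:
--     """Build HTML with a highlighted span of words [start_idx..end_idx]."""
--     words = latin.split()
--     parts = []
--     for i, w in enumerate(words):
--         if start_idx <= i <= end_idx:
--             parts.append(
--                 f'<span style="background-color:{bg}; color:{color}; '
--                 f'border-radius:3px; padding:2px 4px; font-weight:bold;">{w}</span>'
--             )
--         else:
--             parts.append(f'<span style="color:#9999CC;">{w}</span>')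
--     return " ".join(parts)
-- ===== SOURCE B (Python) =====
-- def _highlight_html(latin: str, start_idx: int, end_idx: int, color: str, bg: str) -> str:
--     """Three-segment version: slice the words into before/highlight/after groups."""
--     words = latin.split()
--
--     def dim(ws):
--         return [f'<span style="color:#9999CC;">{w}</span>' for w in ws]
--
--     def bold(ws):
--         return [f'<span style="background-color:{bg}; color:{color}; '
--                 f'border-radius:3px; padding:2px 4px; font-weight:bold;">{w}</span>' for w in ws]
--
--     lo = max(start_idx, 0)
--     hi = min(end_idx, len(words) - 1)
--     if lo > hi:
--         return " ".join(dim(words))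
--     spans = dim(words[:lo]) + bold(words[lo:hi + 1]) + dim(words[hi + 1:])
--     return " ".join(spans)
-- ===== Notes on version B (the rewrite author's own statement) =====
-- stated objective: alternative
-- what changed: Replaces the per-word index-comparison branch inside one enumerate loop by clamping the highlight range to slice bounds lo/hi and mapping each of the three contiguous slices (before / highlighted / after) with its template, then joining.
import Mathlib
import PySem

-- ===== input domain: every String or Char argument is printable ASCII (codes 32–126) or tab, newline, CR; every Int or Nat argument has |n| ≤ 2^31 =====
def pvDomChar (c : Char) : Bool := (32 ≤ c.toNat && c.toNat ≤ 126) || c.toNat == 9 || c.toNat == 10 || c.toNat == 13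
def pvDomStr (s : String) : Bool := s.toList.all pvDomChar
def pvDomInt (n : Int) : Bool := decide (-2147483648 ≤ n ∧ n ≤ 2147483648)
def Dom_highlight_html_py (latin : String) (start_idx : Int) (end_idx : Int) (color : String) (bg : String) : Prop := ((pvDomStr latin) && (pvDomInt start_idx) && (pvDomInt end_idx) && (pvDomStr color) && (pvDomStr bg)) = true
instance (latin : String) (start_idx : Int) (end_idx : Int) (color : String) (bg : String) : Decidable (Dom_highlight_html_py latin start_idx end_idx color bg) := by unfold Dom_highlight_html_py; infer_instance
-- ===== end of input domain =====

-- B replaces A's per-word index test by clamped slice bounds and three mapped segments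
-- (alternative decomposition, same cost); proved to return the same string on all inputs.

-- the two span templates (identical f-strings in both Pythons, shared here)
def pvBoldSpan (color bg w : String) : String :=
  "<span style=\"background-color:" ++ bg ++ "; color:" ++ color ++
    "; border-radius:3px; padding:2px 4px; font-weight:bold;\">" ++ w ++ "</span>"

def pvDimSpan (w : String) : String :=
  "<span style=\"color:#9999CC;\">" ++ w ++ "</span>"

-- ===== PORT A =====
def highlight_html_py (latin : String) (start_idx : Int) (end_idx : Int) (color : String) (bg : String) : String :=
  let words := PySem.Str.split₀ latin
  let parts := (PySem.List.enumerate words 0).foldl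
    (fun acc iw =>
      if start_idx ≤ iw.1 ∧ iw.1 ≤ end_idx then
        acc ++ [pvBoldSpan color bg iw.2]
      else
        acc ++ [pvDimSpan iw.2]) []
  PySem.Str.join " " parts

-- ===== PORT B =====
def highlight_html_py_alt (latin : String) (start_idx : Int) (end_idx : Int) (color : String) (bg : String) : String :=
  let words := PySem.Str.split₀ latin
  let lo := max start_idx 0
  let hi := min end_idx ((words.length : Int) - 1)
  if lo > hi then
    PySem.Str.join " " (words.map pvDimSpan)
  else
    let spans :=
      (PySem.List.slice words none (some lo)).map pvDimSpan
        ++ (PySem.List.slice words (some lo) (some (hi + 1))).map (pvBoldSpan color bg)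
        ++ (PySem.List.slice words (some (hi + 1)) none).map pvDimSpan
    PySem.Str.join " " spans

-- ===== PRECONDITION & SPEC =====
def Spec_highlight_html_py (latin : String) (start_idx : Int) (end_idx : Int) (color : String) (bg : String) (out : String) : Prop := out = highlight_html_py_alt latin start_idx end_idx color bg
instance (latin : String) (start_idx : Int) (end_idx : Int) (color : String) (bg : String) (out : String) : Decidable (Spec_highlight_html_py latin start_idx end_idx color bg out) := by unfold Spec_highlight_html_py; infer_instance

-- ===== CLAIM (what is proved, stated in full; the proofs are below) =====
def Claim_equal_highlight_html_py : Prop := ∀ (latin : String) (start_idx : Int) (end_idx : Int) (color : String) (bg : String), Dom_highlight_html_py latin start_idx end_idx color bg → Spec_highlight_html_py latin start_idx end_idx color bg (highlight_html_py latin start_idx end_idx color bg)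

-- ===== LEMMAS AND PROOFS =====

-- A's loop, written as a map over the enumerated words
theorem pv_parts_eq_map (start_idx end_idx : Int) (color bg : String) (ws : List String) :
    (PySem.List.enumerate ws 0).foldl
      (fun acc iw =>
        if start_idx ≤ iw.1 ∧ iw.1 ≤ end_idx then
          acc ++ [pvBoldSpan color bg iw.2]
        else
          acc ++ [pvDimSpan iw.2]) []
    = (PySem.List.enumerate ws 0).map
        (fun iw => if start_idx ≤ iw.1 ∧ iw.1 ≤ end_idx then pvBoldSpan color bg iw.2 else pvDimSpan iw.2) := by
  have hbody :
      (fun (acc : List String) (iw : Int × String) =>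
        if start_idx ≤ iw.1 ∧ iw.1 ≤ end_idx then
          acc ++ [pvBoldSpan color bg iw.2]
        else
          acc ++ [pvDimSpan iw.2])
      = fun acc iw =>
          acc ++ [if start_idx ≤ iw.1 ∧ iw.1 ≤ end_idx then pvBoldSpan color bg iw.2 else pvDimSpan iw.2] := by
    funext acc iw; split_ifs <;> rfl
  rw [hbody, PySem.List.foldl_append_singleton_eq_map]
  simp

-- main list identity: the enumerated per-index branch equals the three mapped segments
theorem pv_map_eq_segments (start_idx end_idx : Int) (color bg : String) (ws : List String)
    (hlohi : ¬ max start_idx 0 > min end_idx ((ws.length : Int) - 1)) :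
    (PySem.List.enumerate ws 0).map
      (fun iw => if start_idx ≤ iw.1 ∧ iw.1 ≤ end_idx then pvBoldSpan color bg iw.2 else pvDimSpan iw.2)
    = (PySem.List.slice ws none (some (max start_idx 0))).map pvDimSpan
        ++ (PySem.List.slice ws (some (max start_idx 0)) (some (min end_idx ((ws.length : Int) - 1) + 1))).map (pvBoldSpan color bg)
        ++ (PySem.List.slice ws (some (min end_idx ((ws.length : Int) - 1) + 1)) none).map pvDimSpan := by
  set n := ws.length with hn
  have hlo0 : (0:Int) ≤ max start_idx 0 := le_max_right _ _
  have hhi : min end_idx ((n : Int) - 1) ≤ (n:Int) - 1 := min_le_right _ _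
  have hlh : max start_idx 0 ≤ min end_idx ((n : Int) - 1) := not_lt.mp hlohi
  have hhi0 : (0:Int) ≤ min end_idx ((n : Int) - 1) + 1 := by omega
  set a := (max start_idx 0).toNat with ha
  set b := (min end_idx ((n : Int) - 1) + 1).toNat with hb
  have hab : a ≤ b := by omega
  have hbn : b ≤ n := by omega
  rw [PySem.List.slice_to _ hlo0, PySem.List.slice_toNat _ hlo0 hhi0, PySem.List.slice_from _ hhi0]
  rw [← ha, ← hb]
  apply List.ext_getElem
  · simp [PySem.List.length_enumerate]
    omega
  · intro i h1 h2
    rw [List.getElem_map, PySem.List.getElem_enumerate]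
    have hi_n : i < n := by simpa [PySem.List.length_enumerate, hn] using h1
    have hm1 : (List.map pvDimSpan (List.take a ws)).length = a := by simp; omega
    have hm2 : (List.map (pvBoldSpan color bg) (List.take (b - a) (List.drop a ws))).length = b - a := by
      simp; omega
    by_cases hia : i < a
    · have hcond : ¬ (start_idx ≤ ((0:Int) + (i:Int)) ∧ ((0:Int) + (i:Int)) ≤ end_idx) := by omega
      rw [if_neg hcond, List.getElem_append_left (by simp only [List.length_append, hm1, hm2]; omega),
          List.getElem_append_left (by rw [hm1]; omega), List.getElem_map, List.getElem_take]
    · by_cases hib : i < b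
      · have hcond : (start_idx ≤ ((0:Int) + (i:Int)) ∧ ((0:Int) + (i:Int)) ≤ end_idx) := by
          constructor <;> omega
        rw [if_pos hcond, List.getElem_append_left (by simp only [List.length_append, hm1, hm2]; omega),
            List.getElem_append_right (by rw [hm1]; omega), List.getElem_map, List.getElem_take,
            List.getElem_drop]
        simp only [hm1]
        have hidx : a + (i - a) = i := by omega
        simp only [hidx]
      · have hcond : ¬ (start_idx ≤ ((0:Int) + (i:Int)) ∧ ((0:Int) + (i:Int)) ≤ end_idx) := by omega
        rw [if_neg hcond, List.getElem_append_right (by simp only [List.length_append, hm1, hm2]; omega),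
            List.getElem_map, List.getElem_drop]
        simp only [List.length_append, hm1, hm2]
        have hidx : b + (i - (a + (b - a))) = i := by omega
        simp only [hidx]

-- lo > hi: no index satisfies the test, every word gets the dim template
theorem pv_map_eq_all_dim (start_idx end_idx : Int) (color bg : String) (ws : List String)
    (hlohi : max start_idx 0 > min end_idx ((ws.length : Int) - 1)) :
    (PySem.List.enumerate ws 0).map
      (fun iw => if start_idx ≤ iw.1 ∧ iw.1 ≤ end_idx then pvBoldSpan color bg iw.2 else pvDimSpan iw.2)
    = ws.map pvDimSpan := by
  have h : ∀ iw ∈ PySem.List.enumerate ws 0,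
      (if start_idx ≤ iw.1 ∧ iw.1 ≤ end_idx then pvBoldSpan color bg iw.2 else pvDimSpan iw.2)
        = pvDimSpan iw.2 := by
    intro iw hmem
    rcases (PySem.List.mem_enumerate_iff ws 0 iw).mp hmem with ⟨k, hk, rfl⟩
    have : ¬ (start_idx ≤ ((0:Int) + (k:Int)) ∧ ((0:Int) + (k:Int)) ≤ end_idx) := by omega
    rw [if_neg this]
  rw [List.map_congr_left h]
  have := PySem.List.map_snd_enumerate ws (0:Int)
  calc (PySem.List.enumerate ws 0).map (fun iw => pvDimSpan iw.2)
      = ((PySem.List.enumerate ws 0).map (·.2)).map pvDimSpan := by rw [List.map_map]; rfl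
    _ = ws.map pvDimSpan := by rw [this]

-- ===== VERDICT (by name: the statement is the Claim_ definition above) =====
theorem highlight_html_py_spec : Claim_equal_highlight_html_py := by
  intro latin start_idx end_idx color bg _
  unfold Spec_highlight_html_py highlight_html_py highlight_html_py_alt
  simp only
  rw [pv_parts_eq_map]
  by_cases hc : max start_idx 0 > min end_idx (((PySem.Str.split₀ latin).length : Int) - 1)
  · rw [if_pos hc, pv_map_eq_all_dim _ _ _ _ _ hc]
  · rw [if_neg hc, pv_map_eq_segments _ _ _ _ _ hc]
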